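-- pv_equiv track=rewrite | github.com/BrigtHaavardstun/Strong_teaching_book | generateConcepts/generateConcepts.py | generateAndClauseOfSizeK
-- ===== SOURCE A (Python) =====
-- import itertools
--
-- def generateAndClauseOfSizeK(alphabet, size):
--     boolean_list = (list(itertools.combinations(alphabet, size)))
--     boolean_all_bools = []
--     for boolean in boolean_list:
--         boolean_w_negation = []
--         for i in range(pow(2, size)-1,-1,-1): # To have order "deceding", first True,True,True,True, and then True,TrueTrue,False. Finaly False, False,...
--             current_config = [bit=="1" for bit in bin(i)[2:].rjust(size, "0")]
--             new_boolean = ""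
--             for b,c in zip(boolean, current_config):
--                 new_boolean += b
--                 if not c:
--                     new_boolean += "'"
--
--             boolean_w_negation.append(new_boolean)
--
--
--         boolean_all_bools.extend(boolean_w_negation)
--
--     return boolean_all_bools
-- ===== SOURCE B (Python) =====
-- def generateAndClauseOfSizeK(alphabet, size):
--     def blocks(letters, k):
--         # list of per-combination blocks of signed clauses, combos lexicographic,
--         # signs descending within each block (first letter's sign varies slowest)
--         if k == 0:
--             return [[""]]
--         if not letters:
--             return []
--         c, rest = letters[0], letters[1:]
--         with_c = [[c + s for s in sub] + [c + "'" + s for s in sub]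
--                   for sub in blocks(rest, k - 1)]
--         return with_c + blocks(rest, k)
--
--     result = []
--     for block in blocks(alphabet, size):
--         result.extend(block)
--     return result
-- ===== Notes on version B (the rewrite author's own statement) =====
-- stated objective: alternative
-- what changed: B drops itertools.combinations and the descending 2^k counter with bin()/rjust bit extraction entirely: one recursive divide on the alphabet (clauses using the first letter, with its positive/negated forms expanded inline around each sub-block, followed by clauses skipping it) builds the per-combination blocks directly, then a single extend pass flattens them.
import Mathlib
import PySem

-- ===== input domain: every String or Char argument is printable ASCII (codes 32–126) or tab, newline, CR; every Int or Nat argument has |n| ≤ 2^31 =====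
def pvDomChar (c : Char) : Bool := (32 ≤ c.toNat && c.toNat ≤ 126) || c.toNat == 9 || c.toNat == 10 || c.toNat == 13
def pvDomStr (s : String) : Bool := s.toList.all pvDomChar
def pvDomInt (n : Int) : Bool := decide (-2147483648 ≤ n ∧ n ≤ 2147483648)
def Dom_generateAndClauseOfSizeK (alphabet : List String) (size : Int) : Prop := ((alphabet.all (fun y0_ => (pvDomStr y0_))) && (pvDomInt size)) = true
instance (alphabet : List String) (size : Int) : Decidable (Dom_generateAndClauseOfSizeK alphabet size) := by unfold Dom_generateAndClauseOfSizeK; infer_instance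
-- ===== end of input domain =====

-- ===== PORT A =====
-- B replaces A's combinations list + descending counter + bin()/rjust bit extraction by one
-- recursive divide on the alphabet that builds the signed blocks directly (alternative; same cost).

-- helper for A's innermost loop body: new_boolean += b; if not c: new_boolean += "'"
def pvStepA (new_boolean : String) (bc : String × Bool) : String :=
  let nb := new_boolean ++ bc.1
  if !bc.2 then nb ++ "'" else nb

-- bin(i)[2:] for i ≥ 0 is PySem.Int.toBinChars i (no "0b" prefix, no sign);
-- .rjust(size, "0") on a sign-free string is PySem.Chars.zfill (exact here since the
-- binary string of a non-negative i never starts with '+'/'-').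
def generateAndClauseOfSizeK (alphabet : List String) (size : Int) : List String :=
  let boolean_list := PySem.List.combinations alphabet size.toNat
  boolean_list.foldl (fun boolean_all_bools boolean =>
    let boolean_w_negation :=
      (PySem.List.pyRange (2 ^ size.toNat - 1) (-1) (-1)).map (fun i =>
        let current_config :=
          (PySem.Chars.zfill (PySem.Int.toBinChars i) size).map (fun bit => bit == '1')
        (boolean.zip current_config).foldl pvStepA "")
    boolean_all_bools ++ boolean_w_negation) []

-- ===== PORT B =====
-- blocks(letters, k): per-combination blocks of signed clauses; clauses using the first
-- letter (its positive then negated form wrapped around each sub-block), then those without it.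
def pvBlocks (letters : List String) (k : Int) : List (List String) :=
  if k = 0 then [[""]]
  else
    match letters with
    | [] => []
    | c :: rest =>
        ((pvBlocks rest (k - 1)).map (fun sub =>
            sub.map (fun s => c ++ s) ++ sub.map (fun s => c ++ "'" ++ s)))
          ++ pvBlocks rest k

def generateAndClauseOfSizeK_alt (alphabet : List String) (size : Int) : List String :=
  (pvBlocks alphabet size).foldl (fun result block => result ++ block) []

-- ===== PRECONDITION & SPEC =====
-- Pre_: itertools.combinations raises ValueError for a negative size, so A returns only for 0 ≤ size.
def Pre_generateAndClauseOfSizeK (alphabet : List String) (size : Int) : Prop := 0 ≤ size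
instance (alphabet : List String) (size : Int) : Decidable (Pre_generateAndClauseOfSizeK alphabet size) := by unfold Pre_generateAndClauseOfSizeK; infer_instance
def pvWitness_generateAndClauseOfSizeK : List String × Int := (["a", "b"], 2)
def Spec_generateAndClauseOfSizeK (alphabet : List String) (size : Int) (out : List String) : Prop := out = generateAndClauseOfSizeK_alt alphabet size
instance (alphabet : List String) (size : Int) (out : List String) : Decidable (Spec_generateAndClauseOfSizeK alphabet size out) := by unfold Spec_generateAndClauseOfSizeK; infer_instance

-- ===== CLAIM (what is proved, stated in full; the proofs are below) =====
def Claim_equal_generateAndClauseOfSizeK : Prop := ∀ (alphabet : List String) (size : Int), Dom_generateAndClauseOfSizeK alphabet size → Pre_generateAndClauseOfSizeK alphabet size → Spec_generateAndClauseOfSizeK alphabet size (generateAndClauseOfSizeK alphabet size)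
-- ===== LEMMAS AND PROOFS =====

-- the product list of a combination: positive choice first, last position fastest
-- (a proof-side description of each per-combination block; not used by either port)
def pvProdPairs : List String → List (List String)
  | [] => [[]]
  | c :: rest =>
      ((pvProdPairs rest).map (fun t => c :: t)) ++ ((pvProdPairs rest).map (fun t => (c ++ "'") :: t))

-- binRep n = the binary digit string of n (MSB first, "0" for 0) = Nat.toDigits 2 n
def binRep (n : Nat) : List Char :=
  if h : n < 2 then [Nat.digitChar n] else binRep (n / 2) ++ [Nat.digitChar (n % 2)]
decreasing_by exact Nat.div_lt_self (by omega) (by omega)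

lemma toDigitsCore_eq_binRep (f n : Nat) (acc : List Char) (h : n < f) :
    Nat.toDigitsCore 2 f n acc = binRep n ++ acc := by
  induction f generalizing n acc with
  | zero => omega
  | succ f ih =>
    rw [Nat.toDigitsCore]
    by_cases h2 : n / 2 = 0
    · have hn : n < 2 := by omega
      rw [if_pos h2, binRep, dif_pos hn]
      have : n % 2 = n := Nat.mod_eq_of_lt hn
      simp [this]
    · have hd : n / 2 < n := Nat.div_lt_self (by omega) (by omega)
      rw [if_neg h2, ih _ _ (by omega)]
      conv_rhs => rw [binRep, dif_neg (by omega)]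
      simp

lemma toBinChars_natCast (n : Nat) : PySem.Int.toBinChars (n : Int) = binRep n := by
  rw [PySem.Int.toBinChars]
  rw [if_neg (by omega)]
  show Nat.toDigits 2 (Int.toNat (n : Int)) = binRep n
  rw [Int.toNat_natCast]
  show Nat.toDigitsCore 2 (n + 1) n [] = binRep n
  rw [toDigitsCore_eq_binRep (n + 1) n [] (by omega), List.append_nil]

-- rjust with '0' on a sign-free string
def rjustZ (k : Nat) (cs : List Char) : List Char := List.replicate (k - cs.length) '0' ++ cs

lemma binRep_head (n : Nat) : ∃ c t, binRep n = c :: t ∧ c ≠ '+' ∧ c ≠ '-' := by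
  induction n using Nat.strong_induction_on with
  | _ n ih =>
    by_cases h : n < 2
    · refine ⟨Nat.digitChar n, [], by rw [binRep, dif_pos h], ?_, ?_⟩ <;>
        (interval_cases n <;> decide)
    · obtain ⟨c, t, hrep, h1, h2⟩ := ih (n / 2) (Nat.div_lt_self (by omega) (by omega))
      exact ⟨c, t ++ [Nat.digitChar (n % 2)], by rw [binRep, dif_neg h, hrep]; simp, h1, h2⟩

lemma zfill_binRep (n k : Nat) : PySem.Chars.zfill (binRep n) (k : Int) = rjustZ k (binRep n) := by
  obtain ⟨c, t, hrep, h1, h2⟩ := binRep_head n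
  rw [hrep, rjustZ]
  simp only [PySem.Chars.zfill.eq_def]
  split_ifs with hle hsign
  · have hz : k - (c :: t).length = 0 := by
      have : k ≤ (c :: t).length := by exact_mod_cast hle
      omega
    rw [hz]
    rfl
  · tauto
  · rw [Int.toNat_natCast]

-- MSB-first fixed-width binary expansion, peeled from the top
def padBin : Nat → Nat → List Char
  | 0, _ => []
  | k + 1, j => (if 2 ^ k ≤ j then '1' else '0') :: padBin k (j % 2 ^ k)

lemma padBin_zero (k : Nat) : padBin k 0 = List.replicate k '0' := by
  induction k with
  | zero => rfl
  | succ k ih =>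
    rw [padBin, if_neg (by have := Nat.two_pow_pos k; omega), Nat.zero_mod, ih]
    rfl

lemma padBin_snoc (k j : Nat) (h : j < 2 ^ (k + 1)) :
    padBin (k + 1) j = padBin k (j / 2) ++ [Nat.digitChar (j % 2)] := by
  induction k generalizing j with
  | zero =>
    interval_cases j <;> rfl
  | succ k ih =>
    have hlt : j % 2 ^ (k + 1) < 2 ^ (k + 1) := Nat.mod_lt _ (Nat.two_pow_pos _)
    rw [show padBin (k + 1 + 1) j
          = (if 2 ^ (k + 1) ≤ j then '1' else '0') :: padBin (k + 1) (j % 2 ^ (k + 1)) from rfl]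
    rw [ih _ hlt]
    rw [show padBin (k + 1) (j / 2)
          = (if 2 ^ k ≤ j / 2 then '1' else '0') :: padBin k (j / 2 % 2 ^ k) from rfl]
    have e1 : j % 2 ^ (k + 1) / 2 = j / 2 % 2 ^ k := by
      rw [pow_succ]
      exact Nat.mod_mul_left_div_self j 2 (2 ^ k)
    have e2 : j % 2 ^ (k + 1) % 2 = j % 2 := Nat.mod_mod_of_dvd j ⟨2 ^ k, by rw [pow_succ]; ring⟩
    have e3 : (2 ^ (k + 1) ≤ j) ↔ (2 ^ k ≤ j / 2) := by
      rw [pow_succ]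
      omega
    rw [e1, e2]
    simp [e3]

lemma binRep_len (k j : Nat) (h : j < 2 ^ k) (hk : 1 ≤ k) : (binRep j).length ≤ k := by
  induction k generalizing j with
  | zero => omega
  | succ k ih =>
    by_cases h2 : j < 2
    · rw [binRep, dif_pos h2]; simp
    · rw [binRep, dif_neg h2]
      have hk1 : 1 ≤ k := by
        by_contra hc
        have : k = 0 := by omega
        subst this
        simp [pow_succ] at h
        omega
      have : j / 2 < 2 ^ k := by
        rw [Nat.div_lt_iff_lt_mul two_pos]
        calc j < 2 ^ (k + 1) := h
        _ = 2 ^ k * 2 := by rw [pow_succ]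
      have := ih _ this hk1
      simp
      omega

lemma rjust_padBin (k : Nat) (hk : 1 ≤ k) : ∀ j, j < 2 ^ k → rjustZ k (binRep j) = padBin k j := by
  induction k, hk using Nat.le_induction with
  | base =>
    intro j hj
    interval_cases j <;> (rw [binRep]; simp [rjustZ, padBin, Nat.digitChar])
  | succ k hk ih =>
    intro j hj
    by_cases h2 : j < 2
    · rw [padBin_snoc _ _ hj]
      have hj2 : j / 2 = 0 := by omega
      rw [hj2, padBin_zero]
      rw [binRep, dif_pos h2, rjustZ]
      have : j % 2 = j := Nat.mod_eq_of_lt h2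
      rw [this]
      simp
    · rw [padBin_snoc _ _ hj, binRep, dif_neg h2, rjustZ]
      have hhalf : j / 2 < 2 ^ k := by
        rw [Nat.div_lt_iff_lt_mul two_pos]
        calc j < 2 ^ (k + 1) := hj
        _ = 2 ^ k * 2 := by rw [pow_succ]
      rw [← ih _ hhalf, rjustZ]
      have hl : (binRep (j / 2)).length ≤ k := binRep_len k _ hhalf hk
      have : (k + 1) - ((binRep (j / 2)).length + 1) = k - (binRep (j / 2)).length := by omega
      simp [this]

-- fold-shift: prepending an already-built prefix commutes with A's inner fold
lemma foldl_stepA_shift (l : List (String × Bool)) (a b : String) :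
    l.foldl pvStepA (a ++ b) = a ++ l.foldl pvStepA b := by
  induction l generalizing b with
  | nil => rfl
  | cons x l ih =>
    simp only [List.foldl_cons]
    rw [← ih]
    congr 1
    unfold pvStepA
    cases x.2 <;> simp [String.append_assoc]

lemma foldl_append_shift (l : List String) (a b : String) :
    l.foldl (fun r s => r ++ s) (a ++ b) = a ++ l.foldl (fun r s => r ++ s) b := by
  induction l generalizing b with
  | nil => rfl
  | cons x l ih =>
    simp only [List.foldl_cons]
    rw [← ih, String.append_assoc]

lemma join_cons (x : String) (t : List String) : String.join (x :: t) = x ++ String.join t := by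
  show List.foldl (fun r s => r ++ s) "" (x :: t) = _
  rw [List.foldl_cons]
  rw [show ("" ++ x) = x ++ "" from by rw [String.empty_append, String.append_empty]]
  exact foldl_append_shift t x ""

def innerP (combo : List String) (j : Nat) : String :=
  (combo.zip ((padBin combo.length j).map (fun bit => bit == '1'))).foldl pvStepA ""

-- the heart, part 1: per combination, A's descending-counter strings are the product strings
lemma main_inner (combo : List String) :
    ((List.range (2 ^ combo.length)).reverse.map (innerP combo)) =
      (pvProdPairs combo).map String.join := by
  induction combo with
  | nil => rfl
  | cons c rest ih =>
    have hsplit : (2 : Nat) ^ (rest.length + 1) = 2 ^ rest.length + 2 ^ rest.length := by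
      rw [pow_succ]; ring
    rw [List.length_cons, hsplit, List.range_add, List.reverse_append, List.map_append]
    have hhigh : ∀ j ∈ (List.range (2 ^ rest.length)).reverse,
        innerP (c :: rest) (2 ^ rest.length + j) = c ++ innerP rest j := by
      intro j hj
      rw [List.mem_reverse, List.mem_range] at hj
      unfold innerP
      rw [List.length_cons, padBin, if_pos (by omega), Nat.add_mod_left, Nat.mod_eq_of_lt hj]
      simp only [List.map_cons, List.zip_cons_cons, List.foldl_cons]
      have : pvStepA "" (c, ('1' == '1' : Bool)) = c := by
        unfold pvStepA; simp
      rw [this, ← @String.append_empty c, foldl_stepA_shift]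
      simp
    have hlow : ∀ j ∈ (List.range (2 ^ rest.length)).reverse,
        innerP (c :: rest) j = (c ++ "'") ++ innerP rest j := by
      intro j hj
      rw [List.mem_reverse, List.mem_range] at hj
      unfold innerP
      rw [List.length_cons, padBin, if_neg (by omega), Nat.mod_eq_of_lt hj]
      simp only [List.map_cons, List.zip_cons_cons, List.foldl_cons]
      have : pvStepA "" (c, ('0' == '1' : Bool)) = c ++ "'" := by
        unfold pvStepA; simp [String.empty_append]
      rw [this, ← @String.append_empty (c ++ "'"), foldl_stepA_shift]
      simp
    rw [List.map_reverse, List.map_map]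
    have hcomp : (List.map ((fun j => innerP (c :: rest) j) ∘ (fun i => 2 ^ rest.length + i))
        (List.range (2 ^ rest.length))).reverse
        = (List.range (2 ^ rest.length)).reverse.map (fun j => innerP (c :: rest) (2 ^ rest.length + j)) := by
      rw [← List.map_reverse]; rfl
    rw [hcomp, List.map_congr_left hhigh, List.map_congr_left hlow]
    show _ = (pvProdPairs (c :: rest)).map String.join
    rw [pvProdPairs]
    rw [List.map_append, List.map_map, List.map_map]
    congr 1
    · have : (String.join ∘ fun t => c :: t) = (fun t => c ++ String.join t) := by
        funext t; exact join_cons c t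
      rw [this, show (fun t => c ++ String.join t) = (fun s => c ++ s) ∘ String.join from rfl,
        ← List.map_map, ← ih, List.map_map]
      rfl
    · have : (String.join ∘ fun t => (c ++ "'") :: t) = (fun t => (c ++ "'") ++ String.join t) := by
        funext t; exact join_cons _ t
      rw [this, show (fun t => (c ++ "'") ++ String.join t) = (fun s => (c ++ "'") ++ s) ∘ String.join from rfl,
        ← List.map_map, ← ih, List.map_map]
      rfl

-- the heart, part 2: B's recursion produces exactly one product block per combination
lemma blocks_eq (letters : List String) (n : Nat) :
    pvBlocks letters (n : Int)
      = (PySem.List.combinations letters n).map (fun combo => (pvProdPairs combo).map String.join) := by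
  induction letters generalizing n with
  | nil =>
    cases n with
    | zero => rfl
    | succ n =>
      rw [pvBlocks, if_neg (by omega), PySem.List.combinations_nil_succ]
      rfl
  | cons c rest ih =>
    cases n with
    | zero => rfl
    | succ n =>
      rw [pvBlocks, if_neg (by omega)]
      rw [show ((n + 1 : Nat) : Int) - 1 = ((n : Nat) : Int) from by push_cast; ring]
      rw [PySem.List.combinations_cons_succ, List.map_append, List.map_map, ih n, ih (n + 1)]
      congr 1
      rw [List.map_map]
      apply List.map_congr_left
      intro sub _
      show List.map (fun s => c ++ s) ((pvProdPairs sub).map String.join)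
            ++ List.map (fun s => c ++ "'" ++ s) ((pvProdPairs sub).map String.join)
          = List.map String.join (pvProdPairs (c :: sub))
      rw [pvProdPairs, List.map_append, List.map_map, List.map_map, List.map_map, List.map_map]
      congr 1
      · apply List.map_congr_left; intro t _
        show c ++ String.join t = String.join (c :: t)
        exact (join_cons c t).symm
      · apply List.map_congr_left; intro t _
        show c ++ "'" ++ String.join t = String.join ((c ++ "'") :: t)
        rw [join_cons, String.append_assoc]

-- range(2^k - 1, -1, -1) is the reversed list of casts of range(2^k)
lemma pyRange_countdown (n : Nat) :
    PySem.List.pyRange ((n : Int) - 1) (-1) (-1)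
      = List.reverse (List.map (fun (j : Nat) => (j : Int)) (List.range n)) := by
  rw [PySem.List.pyRange_neg_one_eq_reverse]
  congr 1
  rw [show (-1 : Int) + 1 = 0 from by ring, show (n : Int) - 1 + 1 = (n : Int) from by ring]
  exact PySem.List.pyRange_zero_natCast n

-- A's inner string (with zfill of the binary string) equals the padBin form, for combos of length k
lemma bridge (combo : List String) (k j : Nat) (hlen : combo.length = k) (hj : j < 2 ^ k) :
    (combo.zip ((PySem.Chars.zfill (PySem.Int.toBinChars (j : Int)) (k : Int)).map
      (fun bit => bit == '1'))).foldl pvStepA "" = innerP combo j := by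
  rw [toBinChars_natCast, zfill_binRep]
  unfold innerP
  rw [hlen]
  cases k with
  | zero =>
    have : combo = [] := List.eq_nil_of_length_eq_zero hlen
    subst this
    rfl
  | succ k =>
    rw [rjust_padBin _ (by omega) _ hj]

-- ===== VERDICT (by name: the statement is the Claim_ definition above) =====
theorem generateAndClauseOfSizeK_spec : Claim_equal_generateAndClauseOfSizeK := by
  intro alphabet size _ hpre
  unfold Spec_generateAndClauseOfSizeK generateAndClauseOfSizeK generateAndClauseOfSizeK_alt
  simp only []
  obtain ⟨k, hk⟩ : ∃ k : Nat, size = (k : Int) := ⟨size.toNat, (Int.toNat_of_nonneg hpre).symm⟩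
  subst hk
  rw [Int.toNat_natCast, blocks_eq, List.foldl_map]
  apply PySem.List.foldl_congr_mem
  intro acc combo hmem
  congr 1
  have hlen : combo.length = k := PySem.List.length_of_mem_combinations hmem
  have hcast : ((2 : Int) ^ k - 1) = (((2 ^ k : Nat) : Int) - 1) := by push_cast; ring
  rw [hcast, pyRange_countdown, ← List.map_reverse, List.map_map]
  refine Eq.trans (List.map_congr_left (g := innerP combo) (fun j hj => ?_)) ?_
  · rw [List.mem_reverse, List.mem_range] at hj
    exact bridge combo k j hlen hj
  · rw [← hlen]
    exact main_inner combo
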